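-- pv_equiv track=rewrite | github.com/omrishlomy/Huji-CS-intro | week5/checker.py | combine_channels
-- ===== SOURCE A (Python) =====
-- def combine_channels(channels):
--     image = []
--     for row in range(len(channels[0])):
--         image.append([])
--         for columns in range(len(channels[0][0])):
--             image[row].append([])
--     column = 0
--     while column in range(len(channels[0])):
--         for channel in range(len(channels[0][0])):
--             for row in range(len(channels)):
--                 image[column][channel].append(channels[row][column][channel])
--         column += 1
--     return image
-- ===== SOURCE B (Python) =====
-- def combine_channels(channels):
--     if not channels[0]:
--         return []
--     h, w = len(channels[0]), len(channels[0][0])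
--     image = [[[] for _ in range(w)] for _ in range(h)]
--     for layer in reversed(channels):
--         image = [[[layer[c][i]] + image[c][i] for i in range(w)] for c in range(h)]
--     return image
-- ===== Notes on version B (the rewrite author's own statement) =====
-- stated objective: alternative
-- what changed: Instead of preallocating nested empty lists and filling them in place with triple index loops (channels innermost), B makes a single backward pass over the channel list, functionally rebuilding the whole image each step by consing that layer's value onto every pixel.
import Mathlib
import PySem

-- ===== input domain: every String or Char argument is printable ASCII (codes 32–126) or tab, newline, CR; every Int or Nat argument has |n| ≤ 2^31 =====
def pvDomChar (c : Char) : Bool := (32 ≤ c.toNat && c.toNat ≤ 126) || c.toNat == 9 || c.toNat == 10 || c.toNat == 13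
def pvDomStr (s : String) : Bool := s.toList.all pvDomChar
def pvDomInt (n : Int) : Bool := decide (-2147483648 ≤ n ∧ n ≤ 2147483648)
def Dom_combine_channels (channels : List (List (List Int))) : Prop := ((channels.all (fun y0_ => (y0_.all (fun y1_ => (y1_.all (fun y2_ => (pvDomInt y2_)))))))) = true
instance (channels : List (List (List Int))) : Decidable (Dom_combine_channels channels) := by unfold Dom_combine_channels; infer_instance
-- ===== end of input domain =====

-- B replaces A's preallocated nested lists filled by triple index loops (channels innermost)
-- with a single backward pass over the channel list that rebuilds the image functionally,
-- consing each layer's value onto every pixel (alternative decomposition, same cost).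

-- ===== PORT A =====
-- image[column][channel].append(v), with list.set/getD for the in-place mutation
def pvAppendAt (image : List (List (List Int))) (c ch : Nat) (v : Int) : List (List (List Int)) :=
  image.set c ((image.getD c []).set ch (((image.getD c []).getD ch []) ++ [v]))

def combine_channels (channels : List (List (List Int))) : List (List (List Int)) :=
  let h := (channels.getD 0 []).length
  let w := ((channels.getD 0 []).getD 0 []).length
  let image := (List.range h).map (fun _ => (List.range w).map (fun _ => ([] : List Int)))
  (List.range h).foldl (fun img column =>
    (List.range w).foldl (fun img channel =>
      (List.range channels.length).foldl (fun img row =>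
        pvAppendAt img column channel (((channels.getD row []).getD column []).getD channel 0)) img) img) image

-- ===== PORT B =====
-- one step of Source B's loop: image = [[[layer[c][i]] + image[c][i] for i in range(w)] for c in range(h)]
def pvConsLayer (h w : Nat) (img : List (List (List Int))) (layer : List (List Int)) :
    List (List (List Int)) :=
  (List.range h).map (fun c => (List.range w).map (fun i =>
    ((layer.getD c []).getD i 0) :: ((img.getD c []).getD i [])))

def combine_channels_alt (channels : List (List (List Int))) : List (List (List Int)) :=
  if (channels.getD 0 []).isEmpty then []
  else
    channels.reverse.foldl
      (pvConsLayer (channels.getD 0 []).length ((channels.getD 0 []).getD 0 []).length)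
      ((List.range (channels.getD 0 []).length).map (fun _ =>
        (List.range ((channels.getD 0 []).getD 0 []).length).map (fun _ => ([] : List Int))))

-- ===== PRECONDITION & SPEC =====
-- Pre_ is exactly the set of inputs on which the Python A returns (no exception): channels
-- nonempty and, unless the pixel width len(channels[0][0]) is 0 (then A indexes nothing),
-- every channel at least as large as channels[0]'s dimensions at every indexed position;
-- outside it A raises IndexError.
def Pre_combine_channels (channels : List (List (List Int))) : Prop :=
  channels ≠ [] ∧ (((channels.getD 0 []).getD 0 []).length = 0 ∨
    ∀ K ∈ channels, (channels.getD 0 []).length ≤ K.length ∧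
      ∀ c < (channels.getD 0 []).length,
        ((channels.getD 0 []).getD 0 []).length ≤ (K.getD c []).length)
instance (channels : List (List (List Int))) : Decidable (Pre_combine_channels channels) := by
  unfold Pre_combine_channels; infer_instance

def pvWitness_combine_channels : List (List (List Int)) := [[[1, 2], [3, 4]], [[5, 6], [7, 8]]]

def Spec_combine_channels (channels : List (List (List Int))) (out : List (List (List Int))) : Prop := out = combine_channels_alt channels
instance (channels : List (List (List Int))) (out : List (List (List Int))) : Decidable (Spec_combine_channels channels out) := by unfold Spec_combine_channels; infer_instance

-- ===== CLAIM (what is proved, stated in full; the proofs are below) =====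
def Claim_equal_combine_channels : Prop := ∀ (channels : List (List (List Int))), Dom_combine_channels channels → Pre_combine_channels channels → Spec_combine_channels channels (combine_channels channels)

-- ===== LEMMAS AND PROOFS =====

def pvSetApp (img : List (List (List Int))) (c ch : Nat) (vs : List Int) : List (List (List Int)) :=
  img.set c ((img.getD c []).set ch (((img.getD c []).getD ch []) ++ vs))

lemma set_getD_self {α : Type} (l : List α) (i : Nat) (d : α) : l.set i (l.getD i d) = l := by
  rcases Nat.lt_or_ge i l.length with h | h
  · rw [List.getD_eq_getElem l d h, List.set_getElem_self]
  · rw [List.set_eq_of_length_le h]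

lemma getD_set_self {α : Type} (l : List α) (i : Nat) (a d : α) (h : i < l.length) :
    (l.set i a).getD i d = a := by
  simp [List.getD, h]

lemma pvSetApp_nil (img : List (List (List Int))) (c ch : Nat) : pvSetApp img c ch [] = img := by
  unfold pvSetApp
  rw [List.append_nil, set_getD_self, set_getD_self]

lemma pvSetApp_comp (img : List (List (List Int))) (c ch : Nat) (vs ws : List Int) :
    pvSetApp (pvSetApp img c ch vs) c ch ws = pvSetApp img c ch (vs ++ ws) := by
  unfold pvSetApp
  rcases Nat.lt_or_ge c img.length with hc | hc
  · rw [getD_set_self _ _ _ _ hc, List.set_set]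
    rcases Nat.lt_or_ge ch (img.getD c []).length with hch | hch
    · rw [getD_set_self _ _ _ _ hch, List.set_set, List.append_assoc]
    · rw [List.set_eq_of_length_le hch, List.set_eq_of_length_le hch,
        List.set_eq_of_length_le hch]
  · rw [List.set_eq_of_length_le hc, List.set_eq_of_length_le hc, List.set_eq_of_length_le hc]

lemma row_loop (img : List (List (List Int))) (c ch n : Nat) (g : Nat → Int) :
    (List.range n).foldl (fun img r => pvAppendAt img c ch (g r)) img
      = pvSetApp img c ch ((List.range n).map g) := by
  induction n with
  | zero => simp [pvSetApp_nil]
  | succ n ih =>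
    rw [List.range_succ, List.foldl_append, List.map_append, ih]
    show pvSetApp (pvSetApp img c ch _) c ch [g n] = _
    rw [pvSetApp_comp]
    simp

lemma chan_loop (img : List (List (List Int))) (c w' : Nat) (pix : Nat → List Int) :
    (List.range w').foldl (fun img ch => pvSetApp img c ch (pix ch)) img
      = img.set c ((img.getD c []).mapIdx (fun i x => if i < w' then x ++ pix i else x)) := by
  induction w' with
  | zero =>
    simp only [List.range_zero, List.foldl_nil, Nat.not_lt_zero, if_false]
    rw [show List.mapIdx (fun (i : Nat) (x : List Int) => x) (img.getD c []) = img.getD c [] from by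
      apply List.ext_getElem <;> simp, set_getD_self]
  | succ n ih =>
    rw [List.range_succ, List.foldl_append, List.foldl_cons, List.foldl_nil, ih]
    rcases Nat.lt_or_ge c img.length with hc | hc
    · unfold pvSetApp
      rw [getD_set_self _ _ _ _ hc, List.set_set]
      congr 1
      apply List.ext_getElem
      · simp
      · intro i h1 h2
        simp only [List.length_set, List.length_mapIdx] at h1 h2
        by_cases hi : i = n
        · subst hi
          rw [List.getElem_set_self, List.getD_eq_getElem _ _ (by simpa using h1),
            List.getElem_mapIdx, List.getElem_mapIdx]
          simp
        · rw [List.getElem_set_ne (by omega), List.getElem_mapIdx, List.getElem_mapIdx]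
          have : i < n + 1 ↔ i < n := by omega
          simp [this]
    · rw [List.set_eq_of_length_le hc]
      unfold pvSetApp
      rw [List.set_eq_of_length_le hc, List.set_eq_of_length_le hc]

lemma col_loop (img : List (List (List Int))) (h' : Nat)
    (F : Nat → List (List Int) → List (List Int)) :
    (List.range h').foldl (fun img c => img.set c (F c (img.getD c []))) img
      = img.mapIdx (fun c row => if c < h' then F c row else row) := by
  induction h' with
  | zero =>
    simp only [List.range_zero, List.foldl_nil, Nat.not_lt_zero, if_false]
    rw [show List.mapIdx (fun (c : Nat) (row : List (List Int)) => row) img = img from by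
      apply List.ext_getElem <;> simp]
  | succ n ih =>
    rw [List.range_succ, List.foldl_append, List.foldl_cons, List.foldl_nil, ih]
    rcases Nat.lt_or_ge n img.length with hn | hn
    · rw [List.getD_eq_getElem _ _ (by simpa using hn), List.getElem_mapIdx]
      simp only [lt_irrefl, if_false]
      apply List.ext_getElem
      · simp
      · intro i h1 h2
        simp only [List.length_set, List.length_mapIdx] at h1 h2
        by_cases hi : i = n
        · subst hi
          rw [List.getElem_set_self, List.getElem_mapIdx]
          simp
        · rw [List.getElem_set_ne (by omega), List.getElem_mapIdx, List.getElem_mapIdx]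
          have : i < n + 1 ↔ i < n := by omega
          simp [this]
    · rw [List.set_eq_of_length_le (by simpa using hn)]
      apply List.ext_getElem
      · simp
      · intro i h1 h2
        simp only [List.length_mapIdx] at h1
        rw [List.getElem_mapIdx, List.getElem_mapIdx]
        have h1' : i < n ∧ i < n + 1 := by omega
        simp [h1'.1, h1'.2]

lemma map_range_getD {α β : Type} (xs : List α) (d : α) (f : α → β) :
    (List.range xs.length).map (fun r => f (xs.getD r d)) = xs.map f := by
  apply List.ext_getElem
  · simp
  · intro i h1 h2
    simp only [List.getElem_map, List.getElem_range]
    rw [List.getD_eq_getElem xs d (by simpa using h1)]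

-- the common closed form: pixel (c,i) is the list of channel values across the stack
def CF' (H W : Nat) (layers : List (List (List Int))) : List (List (List Int)) :=
  (List.range H).map (fun c =>
    (List.range W).map (fun i =>
      layers.map (fun K => (K.getD c []).getD i 0)))

def CF (channels : List (List (List Int))) : List (List (List Int)) :=
  CF' (channels.getD 0 []).length ((channels.getD 0 []).getD 0 []).length channels

lemma hA (channels : List (List (List Int))) : combine_channels channels = CF channels := by
  have hpix : ∀ c i : Nat,
      (List.range channels.length).map (fun r => ((channels.getD r []).getD c []).getD i 0)
        = channels.map (fun K => (K.getD c []).getD i 0) := fun c i =>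
    map_range_getD channels [] (fun K => (K.getD c []).getD i 0)
  calc combine_channels channels
      = (List.range (channels.getD 0 []).length).foldl (fun img c =>
          (List.range ((channels.getD 0 []).getD 0 []).length).foldl (fun img ch =>
            (List.range channels.length).foldl (fun img r =>
              pvAppendAt img c ch (((channels.getD r []).getD c []).getD ch 0)) img) img)
          ((List.range (channels.getD 0 []).length).map (fun _ =>
            (List.range ((channels.getD 0 []).getD 0 []).length).map (fun _ => ([] : List Int)))) := rfl
    _ = (List.range (channels.getD 0 []).length).foldl (fun img c =>
          img.set c ((img.getD c []).mapIdx (fun i x =>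
            if i < ((channels.getD 0 []).getD 0 []).length then
              x ++ (List.range channels.length).map
                (fun r => ((channels.getD r []).getD c []).getD i 0)
            else x)))
          ((List.range (channels.getD 0 []).length).map (fun _ =>
            (List.range ((channels.getD 0 []).getD 0 []).length).map (fun _ => ([] : List Int)))) := by
        congr 1
        funext img c
        have hrow : (fun (img : List (List (List Int))) (ch : Nat) =>
            (List.range channels.length).foldl (fun img r =>
              pvAppendAt img c ch (((channels.getD r []).getD c []).getD ch 0)) img)
            = fun img ch => pvSetApp img c ch ((List.range channels.length).map
              (fun r => ((channels.getD r []).getD c []).getD ch 0)) := by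
          funext img ch
          exact row_loop img c ch channels.length _
        rw [hrow, chan_loop]
    _ = ((List.range (channels.getD 0 []).length).map (fun _ =>
          (List.range ((channels.getD 0 []).getD 0 []).length).map (fun _ => ([] : List Int)))).mapIdx
          (fun c row => if c < (channels.getD 0 []).length then
            row.mapIdx (fun i x =>
              if i < ((channels.getD 0 []).getD 0 []).length then
                x ++ (List.range channels.length).map
                  (fun r => ((channels.getD r []).getD c []).getD i 0)
              else x)
            else row) :=
        col_loop _ _ _
    _ = CF channels := by
        unfold CF CF'
        apply List.ext_getElem
        · simp
        · intro c h1 h2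
          simp only [List.length_mapIdx, List.length_map, List.length_range] at h1 h2
          simp only [List.getElem_mapIdx, List.getElem_map, List.getElem_range, h1, if_true]
          apply List.ext_getElem
          · simp
          · intro i hi1 hi2
            simp only [List.length_mapIdx, List.length_map, List.length_range] at hi1 hi2
            simp only [List.getElem_mapIdx, List.getElem_map, List.getElem_range, hi1, if_true,
              List.nil_append, hpix]

lemma CF'_cell (H W c i : Nat) (rest : List (List (List Int))) (hc : c < H) (hi : i < W) :
    ((CF' H W rest).getD c []).getD i [] = rest.map (fun K => (K.getD c []).getD i 0) := by
  have h1 : (CF' H W rest).getD c []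
      = (List.range W).map (fun i => rest.map (fun K => (K.getD c []).getD i 0)) := by
    unfold CF'
    rw [List.getD_eq_getElem _ _ (by simpa using hc), List.getElem_map, List.getElem_range]
  rw [h1, List.getD_eq_getElem _ _ (by simpa using hi), List.getElem_map, List.getElem_range]

lemma cons_step (H W : Nat) (rest : List (List (List Int))) (layer : List (List Int)) :
    pvConsLayer H W (CF' H W rest) layer = CF' H W (layer :: rest) := by
  unfold pvConsLayer
  rw [show CF' H W (layer :: rest) = (List.range H).map (fun c => (List.range W).map (fun i =>
    (layer :: rest).map (fun K => (K.getD c []).getD i 0))) from rfl]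
  apply List.map_congr_left
  intro c hc
  rw [List.mem_range] at hc
  apply List.map_congr_left
  intro i hi
  rw [List.mem_range] at hi
  rw [CF'_cell H W c i rest hc hi]
  rfl

lemma fold_stack (H W : Nat) (ys rest : List (List (List Int))) :
    ys.foldl (pvConsLayer H W) (CF' H W rest) = CF' H W (ys.reverse ++ rest) := by
  induction ys generalizing rest with
  | nil => simp
  | cons y ys ih =>
    rw [List.foldl_cons, cons_step, ih]
    simp

lemma CF'_nil (H W : Nat) :
    CF' H W [] = (List.range H).map (fun _ => (List.range W).map (fun _ => ([] : List Int))) := by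
  unfold CF'
  simp

lemma hB (channels : List (List (List Int))) : combine_channels_alt channels = CF channels := by
  unfold combine_channels_alt
  split_ifs with he
  · rw [List.isEmpty_iff] at he
    unfold CF
    rw [he]
    rfl
  · rw [← CF'_nil, fold_stack, List.reverse_reverse, List.append_nil]
    rfl

-- ===== VERDICT (by name: the statement is the Claim_ definition above) =====
theorem combine_channels_spec : Claim_equal_combine_channels := by
  intro channels _hdom _hpre
  unfold Spec_combine_channels
  rw [hA, hB]
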